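-- pv_equiv track=rewrite | github.com/BeiJielxc/json-repair-script | main.py | _compute_string_ranges
-- ===== SOURCE A (Python) =====
-- from typing import Tuple, List
--
-- def _compute_string_ranges(s: str) -> List[Tuple[int, int]]:
--     """
--     计算 JSON 文本中字符串字面量的区间（包含引号本身）。
--     注意：该方法基于 JSON 的转义规则（\\ 和 \") 做近似扫描；
--     对“未闭合字符串”会把区间延伸到文本末尾。
--     """
--     ranges: List[Tuple[int, int]] = []
--     in_string = False
--     escape_next = False
--     start = -1
--
--     for i, ch in enumerate(s):
--         if escape_next:
--             escape_next = False
--             continue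
--         if ch == "\\":
--             escape_next = True
--             continue
--         if ch == '"':
--             if not in_string:
--                 in_string = True
--                 start = i
--             else:
--                 in_string = False
--                 ranges.append((start, i))
--                 start = -1
--
--     if in_string and start >= 0:
--         ranges.append((start, len(s) - 1))
--
--     return ranges
-- ===== SOURCE B (Python) =====
-- from typing import Tuple, List
--
-- def _compute_string_ranges(s: str) -> List[Tuple[int, int]]:
--     # Pass 1: collect the indices of all unescaped quotes (a backslash
--     # skips the next character, exactly like JSON escape scanning).
--     n = len(s)
--     quotes: List[int] = []
--     i = 0
--     while i < n:
--         c = s[i]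
--         if c == "\\":
--             i += 2
--             continue
--         if c == '"':
--             quotes.append(i)
--         i += 1
--     # Pass 2: pair the quotes up; an unpaired final quote opens an
--     # unclosed string extending to the end of the text.
--     ranges: List[Tuple[int, int]] = []
--     rest = quotes
--     while len(rest) >= 2:
--         ranges.append((rest[0], rest[1]))
--         rest = rest[2:]
--     if rest:
--         ranges.append((rest[0], n - 1))
--     return ranges
-- ===== Notes on version B (the rewrite author's own statement) =====
-- stated objective: alternative
-- what changed: Replaces the single stateful scan (in_string/escape_next/start flags) with two passes: an index loop that collects unescaped quote positions (advancing by 2 on a backslash, so no escape flag is kept), then a pairing loop over that list that emits ranges two quotes at a time and extends a leftover quote to the end of the text.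
import Mathlib
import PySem

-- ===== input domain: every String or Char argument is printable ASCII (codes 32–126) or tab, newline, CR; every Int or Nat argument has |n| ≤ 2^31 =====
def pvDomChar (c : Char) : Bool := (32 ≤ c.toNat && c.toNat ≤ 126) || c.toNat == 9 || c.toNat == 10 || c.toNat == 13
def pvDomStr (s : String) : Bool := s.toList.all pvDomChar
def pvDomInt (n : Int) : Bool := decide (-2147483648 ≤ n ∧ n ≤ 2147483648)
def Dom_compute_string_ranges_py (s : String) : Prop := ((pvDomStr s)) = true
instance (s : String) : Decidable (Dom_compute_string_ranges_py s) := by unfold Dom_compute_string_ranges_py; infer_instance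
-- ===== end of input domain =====

-- B replaces A's single stateful scan by two passes (collect unescaped quote
-- indices, then pair them); same cost, different decomposition (objective: alternative).

-- ===== PORT A =====
-- state: (ranges, in_string, escape_next, start)
def aStep (st : List (Int × Int) × Bool × Bool × Int) (p : Int × Char) :
    List (Int × Int) × Bool × Bool × Int :=
  match st with
  | (ranges, instr, esc, start) =>
    if esc then (ranges, instr, false, start)
    else if p.2 = '\\' then (ranges, instr, true, start)
    else if p.2 = '"' then
      if !instr then (ranges, true, esc, p.1)
      else (ranges ++ [(start, p.1)], false, esc, -1)
    else (ranges, instr, esc, start)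

def compute_string_ranges_py (s : String) : List (Int × Int) :=
  let st := (PySem.List.enumerate s.toList 0).foldl aStep ([], false, false, -1)
  if st.2.1 = true ∧ 0 ≤ st.2.2.2 then st.1 ++ [(st.2.2.2, (s.toList.length : Int) - 1)]
  else st.1

-- ===== PORT B =====
-- pass 1: while-loop over an index, advancing by 2 on a backslash
def altQuotes : List Char → Int → List Int
  | [], _ => []
  | c :: rest, i =>
    if c = '\\' then altQuotes (rest.drop 1) (i + 2)
    else if c = '"' then i :: altQuotes rest (i + 1)
    else altQuotes rest (i + 1)
termination_by l _ => l.length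
decreasing_by
  · simp only [List.length_drop, List.length_cons]; omega
  · simp
  · simp

-- pass 2: consume the quote list two at a time
def altPairs (n : Int) : List Int → List (Int × Int)
  | a :: b :: rest => (a, b) :: altPairs n rest
  | [a] => [(a, n - 1)]
  | [] => []

def compute_string_ranges_py_alt (s : String) : List (Int × Int) :=
  altPairs ((s.toList.length : Int)) (altQuotes s.toList 0)

-- ===== PRECONDITION & SPEC =====
def Spec_compute_string_ranges_py (s : String) (out : List (Int × Int)) : Prop := out = compute_string_ranges_py_alt s
instance (s : String) (out : List (Int × Int)) : Decidable (Spec_compute_string_ranges_py s out) := by unfold Spec_compute_string_ranges_py; infer_instance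

-- ===== CLAIM (what is proved, stated in full; the proofs are below) =====
def Claim_equal_compute_string_ranges_py : Prop := ∀ (s : String), Dom_compute_string_ranges_py s → Spec_compute_string_ranges_py s (compute_string_ranges_py s)

-- ===== LEMMAS AND PROOFS =====

-- quote collection with an explicit escape flag (structural recursion), used to
-- bridge A's escape_next state to B's skip-by-two loop
def altQ : Bool → List Char → Int → List Int
  | _, [], _ => []
  | esc, c :: rest, i =>
    if esc then altQ false rest (i + 1)
    else if c = '\\' then altQ true rest (i + 1)
    else if c = '"' then i :: altQ false rest (i + 1)
    else altQ false rest (i + 1)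

lemma altQuotes_eq_altQ (l : List Char) (i : Int) : altQuotes l i = altQ false l i := by
  induction l, i using altQuotes.induct with
  | case1 i => simp [altQuotes, altQ]
  | case2 rest i ih =>
    cases rest with
    | nil => simp [altQuotes, altQ]
    | cons d rest' => simpa [altQuotes, altQ, show i + 1 + 1 = i + 2 from by ring] using ih
  | case3 rest i hq ih => simp [altQuotes, altQ, ih]
  | case4 c rest i hc hq ih => simp [altQuotes, altQ, hc, hq, ih]

def finishA (n : Int) (st : List (Int × Int) × Bool × Bool × Int) : List (Int × Int) :=
  if st.2.1 = true ∧ 0 ≤ st.2.2.2 then st.1 ++ [(st.2.2.2, n - 1)] else st.1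

lemma main_invariant (n : Int) (l : List Char) :
    ∀ (i : Int) (ranges : List (Int × Int)) (instr esc : Bool) (start : Int),
      (instr = true → 0 ≤ start) → 0 ≤ i →
      finishA n ((PySem.List.enumerate l i).foldl aStep (ranges, instr, esc, start))
        = ranges ++ altPairs n ((if instr then [start] else []) ++ altQ esc l i) := by
  induction l with
  | nil =>
    intro i ranges instr esc start hst _
    cases instr with
    | false => simp [PySem.List.enumerate, finishA, altQ, altPairs]
    | true => simp [PySem.List.enumerate, finishA, altQ, altPairs, hst rfl]
  | cons c rest ih =>
    intro i ranges instr esc start hst hi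
    rw [PySem.List.enumerate_cons]
    simp only [List.foldl_cons]
    cases esc with
    | true =>
      have := ih (i + 1) ranges instr false start hst (by omega)
      simpa [aStep, altQ] using this
    | false =>
      by_cases hc : c = '\\'
      · have := ih (i + 1) ranges instr true start hst (by omega)
        simpa [aStep, altQ, hc] using this
      · by_cases hq : c = '"'
        · cases instr with
          | false =>
            have := ih (i + 1) ranges true false i (fun _ => hi) (by omega)
            simpa [aStep, altQ, hc, hq] using this
          | true =>
            have := ih (i + 1) (ranges ++ [(start, i)]) false false (-1)
              (by intro h; exact absurd h (by simp)) (by omega)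
            simp [aStep, altQ, hq, altPairs] at this ⊢
            rw [this]
        · have := ih (i + 1) ranges instr false start hst (by omega)
          simpa [aStep, altQ, hc, hq] using this

-- ===== VERDICT (by name: the statement is the Claim_ definition above) =====
theorem compute_string_ranges_py_spec : Claim_equal_compute_string_ranges_py := by
  intro s _
  unfold Spec_compute_string_ranges_py compute_string_ranges_py compute_string_ranges_py_alt
  have h := main_invariant ((s.toList.length : Int)) s.toList 0 [] false false (-1)
    (by simp) (by omega)
  simpa [finishA, altQuotes_eq_altQ] using h
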